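-- pv_equiv track=rewrite | github.com/robin-oval/compas_quad | src/compas_quad/utilities.py | list_split
-- ===== SOURCE A (Python) =====
-- def list_split(in_list, indices):
--     """Split list at given indices.
--     Closed lists have the same first and last elements.
--     If the list is closed, splitting wraps around if the first or last index is not in the indices to split.
--
--
--     Parameters
--     ----------
--     in_list : list
--             A list.
--     indices : list
--             A list of indices to split.
--
--     Returns
--     -------
--     split_lists : list
--             Nest lists from splitting the list at the given indices.
--
--     """
--
--     n = len(in_list)
--
--     if in_list[0] == in_list[-1]:
--         closed = True
--         if n - 1 in indices:
--             indices.remove(n - 1)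
--             if 0 not in indices:
--                 indices.append(0)
--     else:
--         closed = False
--
--     indices = list(sorted(set(indices)))
--
--     split_lists = []
--     current_list = []
--     for index, item in enumerate(in_list):
--         current_list.append(item)
--         if (index in indices and index != 0) or index == n - 1:
--             split_lists.append(current_list)
--             current_list = [item]
--
--     if closed:
--         if 0 not in indices:
--             start = split_lists.pop(0)[1:]
--             split_lists[-1] += start
--
--     return split_lists
-- ===== SOURCE B (Python) =====
-- # Boundary-driven re-implementation: compute the sorted cut positions once, then make
-- # each segment with one slice per cut, instead of A's per-element accumulate-and-emit loop.
-- # Keeps A's in-place mutation of `indices` (remove(n-1)/append(0) for closed lists).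
-- def list_split(in_list, indices):
--     n = len(in_list)
--     closed = in_list[0] == in_list[-1]
--     if closed and n - 1 in indices:
--         indices.remove(n - 1)
--         if 0 not in indices:
--             indices.append(0)
--     zero_cut = 0 in indices
--     cuts = sorted({i for i in indices if 0 < i < n - 1} | {n - 1})
--     segs = [in_list[a:b + 1] for a, b in zip([0] + cuts[:-1], cuts)]
--     if closed and not zero_cut:
--         segs[-1] = segs[-1] + segs[0][1:]
--         segs = segs[1:]
--     return segs
-- ===== Notes on version B (the rewrite author's own statement) =====
-- stated objective: faster
-- what changed: B computes the sorted cut positions once and emits each segment with a single slice in_list[a:b+1] over consecutive cut pairs, instead of A's per-element accumulate-and-emit loop over enumerate(in_list) with an 'index in indices' membership test and a list append at every element; the closed-list index-mutation preamble and the wrap-around merge are kept.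
-- outside the precondition, e.g. on list_split([], []): A raises IndexError, B raises IndexError; on list_split([1, 2, 1], []): A raises IndexError, B returns []
import Mathlib
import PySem

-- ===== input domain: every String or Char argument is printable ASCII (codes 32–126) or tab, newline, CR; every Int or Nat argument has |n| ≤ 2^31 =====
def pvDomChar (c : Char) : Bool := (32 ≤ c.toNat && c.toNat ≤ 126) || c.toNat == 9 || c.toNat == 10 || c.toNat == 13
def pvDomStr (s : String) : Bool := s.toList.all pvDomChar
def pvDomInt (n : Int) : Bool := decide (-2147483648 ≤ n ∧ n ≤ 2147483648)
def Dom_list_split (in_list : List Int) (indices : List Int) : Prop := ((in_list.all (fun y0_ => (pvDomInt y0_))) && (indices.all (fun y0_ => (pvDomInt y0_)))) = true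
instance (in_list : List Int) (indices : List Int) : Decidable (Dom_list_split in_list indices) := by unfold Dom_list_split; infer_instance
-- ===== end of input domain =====

-- B replaces A's per-element accumulate-and-emit loop with one slice per sorted cut position
-- (objective: faster, measured); both mutate the `indices` argument identically in
-- Python (the closed-list remove(n-1)/append(0) preamble), so only the return value is at stake.

-- ===== PORT A =====

-- the shared preamble of A (and of B, whose Python keeps these lines verbatim):
-- the in-place `indices.remove(n-1)` / `indices.append(0)` mutation for a closed list
def pvMutIndices (indices : List Int) (n : Int) (closed : Bool) : List Int :=
  if closed = true ∧ (n - 1) ∈ indices then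
    -- remove? is guarded by the membership test, so it is always `some` here
    let ind := (PySem.List.remove? indices (n - 1)).getD indices
    if (0 : Int) ∈ ind then ind else ind ++ [0]
  else indices

-- A's `for index, item in enumerate(in_list)` loop: state (split_lists, current_list)
def pvLoopA (idx : List Int) (n : Int) :
    List (Int × Int) → List (List Int) × List Int → List (List Int) × List Int
  | [], st => st
  | (index, item) :: rest, (splits, cur) =>
      let cur' := cur ++ [item]
      if (index ∈ idx ∧ index ≠ 0) ∨ index = n - 1 then
        pvLoopA idx n rest (splits ++ [cur'], [item])
      else
        pvLoopA idx n rest (splits, cur')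

def list_split (in_list : List Int) (indices : List Int) : List (List Int) :=
  let n : Int := in_list.length
  match PySem.List.pyGet? in_list 0, PySem.List.pyGet? in_list (-1) with
  | some hd, some lst =>
    let closed : Bool := hd == lst
    let indices1 := pvMutIndices indices n closed
    let indices2 := PySem.List.sorted (PySem.Set.ofList indices1) (fun x => x)
    let split_lists := (pvLoopA indices2 n (PySem.List.enumerate in_list 0) ([], [])).1
    if closed = true ∧ (0 : Int) ∉ indices2 then
      match split_lists with
      | [] => []              -- Python: split_lists.pop(0) raises IndexError here (excluded by Pre_)
      | s0 :: rest =>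
        match rest with
        | [] => []            -- Python: split_lists[-1] raises IndexError here (excluded by Pre_)
        | r :: rs =>          -- split_lists[-1] += start: update of the last element of a nonempty list (exact)
          (r :: rs).dropLast ++ [(r :: rs).getLastD [] ++ PySem.List.slice s0 (some 1) none]
    else split_lists
  | _, _ => []                -- Python: in_list[0] raises IndexError on the empty list (excluded by Pre_)

-- ===== PORT B =====

-- Source B keeps A's closed-list preamble verbatim, so B carries its own copy of it
def pvMutIndicesB (indices : List Int) (n : Int) (closed : Bool) : List Int :=
  if closed = true ∧ (n - 1) ∈ indices then
    -- remove? is guarded by the membership test, so it is always `some` here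
    let ind := (PySem.List.remove? indices (n - 1)).getD indices
    if (0 : Int) ∈ ind then ind else ind ++ [0]
  else indices

def list_split_alt (in_list : List Int) (indices : List Int) : List (List Int) :=
  let n : Int := in_list.length
  if in_list = [] then []       -- Python: in_list[0] raises IndexError on the empty list (excluded by Pre_)
  else
    let closed : Bool := PySem.List.pyGetD in_list 0 0 == PySem.List.pyGetD in_list (-1) 0
    let indices1 := pvMutIndicesB indices n closed
    let zero_cut : Bool := decide ((0 : Int) ∈ indices1)
    -- cuts = sorted({i for i in indices if 0 < i < n - 1} | {n - 1})
    let cuts : List Int := PySem.List.sorted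
      (PySem.Set.add (PySem.Set.ofList (indices1.filter (fun i => decide (0 < i ∧ i < n - 1)))) (n - 1))
      (fun x => x)
    -- segs = [in_list[a:b+1] for a, b in zip([0] + cuts[:-1], cuts)]
    let segs := (((0 : Int) :: PySem.List.slice cuts none (some (-1))).zip cuts).map
      (fun p => PySem.List.slice in_list (some p.1) (some (p.2 + 1)))
    if closed = true ∧ zero_cut = false then
      match segs with
      | s0 :: rest =>               -- segs[-1] = segs[-1] + segs[0][1:]; segs = segs[1:]
        let segs2 := (s0 :: rest).dropLast ++ [(s0 :: rest).getLastD [] ++ PySem.List.slice s0 (some 1) none]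
        PySem.List.slice segs2 (some 1) none
      | [] => []                    -- Python: segs[-1] raises IndexError on the empty list (cuts is never empty)
    else segs

-- ===== PRECONDITION & SPEC =====
-- Pre_ excludes exactly the inputs where A raises IndexError: the empty list (in_list[0]),
-- and a closed list none of whose split indices lies in [0, n-1] (split_lists.pop(0) /
-- split_lists[-1] on a too-short list during the wrap-around step).
def Pre_list_split (in_list : List Int) (indices : List Int) : Prop :=
  in_list ≠ [] ∧
    (in_list.head? = in_list.getLast? →
      ∃ i ∈ indices, 0 ≤ i ∧ i ≤ (in_list.length : Int) - 1)
instance (in_list : List Int) (indices : List Int) : Decidable (Pre_list_split in_list indices) := by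
  unfold Pre_list_split; infer_instance

def pvWitness_list_split : List Int × List Int := ([1, 2, 3], [1])

def Spec_list_split (in_list : List Int) (indices : List Int) (out : List (List Int)) : Prop :=
  out = list_split_alt in_list indices
instance (in_list : List Int) (indices : List Int) (out : List (List Int)) :
    Decidable (Spec_list_split in_list indices out) := by unfold Spec_list_split; infer_instance

-- ===== CLAIM (what is proved, stated in full; the proofs are below) =====
def Claim_equal_list_split : Prop :=
  ∀ (in_list : List Int) (indices : List Int), Dom_list_split in_list indices →
    Pre_list_split in_list indices → Spec_list_split in_list indices (list_split in_list indices)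

-- ===== LEMMAS AND PROOFS =====

-- the segment list read off the sorted cut positions: slices [prev : c+1] for successive cuts
def pvSegsFrom (in_list : List Int) : Int → List Int → List (List Int)
  | _, [] => []
  | p, c :: cs => PySem.List.slice in_list (some p) (some (c + 1)) :: pvSegsFrom in_list c cs

lemma length_pvSegsFrom (in_list : List Int) :
    ∀ (cs : List Int) (p : Int), (pvSegsFrom in_list p cs).length = cs.length := by
  intro cs
  induction cs with
  | nil => intro p; rfl
  | cons c cs ih => intro p; simp [pvSegsFrom, ih]

-- appending the next element extends the slice by one
lemma pvSlice_snoc (xs : List Int) (p a : Nat) (hp : p ≤ a) (ha : a < xs.length) :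
    PySem.List.slice xs (some (p : Int)) (some (a : Int)) ++ [xs[a]] =
      PySem.List.slice xs (some (p : Int)) (some ((a : Int) + 1)) := by
  have h1 : ((a : Int) + 1) = ((a + 1 : Nat) : Int) := by push_cast; ring
  rw [h1, PySem.List.slice_natCast, PySem.List.slice_natCast]
  have h2 : a + 1 - p = (a - p) + 1 := by omega
  rw [h2, List.take_add_one]
  have h3 : (xs.drop p)[a - p]? = some xs[a] := by
    rw [List.getElem?_drop]
    have : p + (a - p) = a := by omega
    rw [this, List.getElem?_eq_getElem ha]
  rw [h3]
  rfl

lemma pvSlice_single (xs : List Int) (a : Nat) (ha : a < xs.length) :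
    PySem.List.slice xs (some (a : Int)) (some ((a : Int) + 1)) = [xs[a]] := by
  have h1 : ((a : Int) + 1) = ((a + 1 : Nat) : Int) := by push_cast; ring
  rw [h1, PySem.List.slice_natCast]
  have h2 : a + 1 - a = 1 := by omega
  rw [h2, List.drop_eq_getElem_cons ha]
  rfl

-- filtering a strictly sorted list at a member splits off exactly that member
lemma pvFilter_ge_mem : ∀ (l : List Int), l.Pairwise (· < ·) → ∀ (a : Int), a ∈ l →
    l.filter (fun c => decide (a ≤ c)) = a :: l.filter (fun c => decide (a + 1 ≤ c)) := by
  intro l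
  induction l with
  | nil => intro _ a ha; simp at ha
  | cons c cs ih =>
    intro hp a ha
    have hlt : ∀ b ∈ cs, c < b := (List.pairwise_cons.mp hp).1
    rcases List.mem_cons.mp ha with rfl | hmem
    · simp only [List.filter_cons]
      rw [if_pos (by simp), if_neg (by simp)]
      congr 1
      apply List.filter_congr
      intro b hb
      have hab := hlt b hb
      exact decide_eq_decide.mpr (by omega)
    · have hca : c < a := hlt a hmem
      simp only [List.filter_cons]
      rw [if_neg (by simp; omega), if_neg (by simp; omega)]
      exact ih (List.pairwise_cons.mp hp).2 a hmem

lemma pvFilter_ge_not_mem (l : List Int) (a : Int) (ha : a ∉ l) :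
    l.filter (fun c => decide (a ≤ c)) = l.filter (fun c => decide (a + 1 ≤ c)) := by
  apply List.filter_congr
  intro b hb
  have hne : b ≠ a := fun h => ha (h ▸ hb)
  exact decide_eq_decide.mpr (by omega)

-- the two verbatim copies of the preamble are the same function
lemma pvMutIndicesB_eq (indices : List Int) (n : Int) (closed : Bool) :
    pvMutIndicesB indices n closed = pvMutIndices indices n closed := rfl

-- the closed-list preamble, once it fires, always puts 0 into the index list
lemma pvMutIndices_zero_mem (indices : List Int) (n : Int) (h : (n - 1) ∈ indices) :
    (0 : Int) ∈ pvMutIndices indices n true := by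
  unfold pvMutIndices
  rw [if_pos ⟨rfl, h⟩]
  dsimp only
  split_ifs with h0
  · exact h0
  · simp

lemma pvMutIndices_eq_self (indices : List Int) (n : Int) (closed : Bool)
    (h : ¬ (closed = true ∧ (n - 1) ∈ indices)) : pvMutIndices indices n closed = indices := by
  unfold pvMutIndices
  rw [if_neg h]

-- A's loop, started at position a with current_list = in_list[prev:a], emits exactly the
-- slices between the remaining cut positions
lemma pvLoopA_eq (in_list idx cuts : List Int)
    (hcuts : ∀ c : Int, c ∈ cuts ↔
      (((c ∈ idx ∧ c ≠ 0) ∨ c = (in_list.length : Int) - 1) ∧ 0 ≤ c ∧ c < (in_list.length : Int)))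
    (hsort : cuts.Pairwise (· < ·)) :
    ∀ (l : List Int) (a prev : Nat) (S : List (List Int)),
      l = in_list.drop a → prev ≤ a → a ≤ in_list.length →
      (pvLoopA idx (in_list.length : Int) (PySem.List.enumerate l (a : Int))
        (S, PySem.List.slice in_list (some (prev : Int)) (some (a : Int)))).1
        = S ++ pvSegsFrom in_list (prev : Int) (cuts.filter (fun c => decide ((a : Int) ≤ c))) := by
  intro l
  induction l with
  | nil =>
    intro a prev S hl hpa han
    have hge : in_list.length ≤ a := by
      by_contra h
      have := List.drop_eq_nil_iff.mp hl.symm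
      omega
    have hfil : cuts.filter (fun c => decide ((a : Int) ≤ c)) = [] := by
      apply List.filter_eq_nil_iff.mpr
      intro c hc
      have := (hcuts c).mp hc
      simp only [decide_eq_true_eq]
      omega
    simp [PySem.List.enumerate, pvLoopA, hfil, pvSegsFrom]
  | cons x l' ih =>
    intro a prev S hl hpa han
    have halt : a < in_list.length := by
      by_contra h
      have : in_list.drop a = [] := List.drop_eq_nil_iff.mpr (by omega)
      rw [this] at hl
      simp at hl
    have hdrop := List.drop_eq_getElem_cons halt
    rw [hdrop] at hl
    injection hl with hx hl'
    have hcast : ((a : Int) + 1) = ((a + 1 : Nat) : Int) := by push_cast; ring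
    have hcur : PySem.List.slice in_list (some (prev : Int)) (some (a : Int)) ++ [x] =
        PySem.List.slice in_list (some (prev : Int)) (some ((a + 1 : Nat) : Int)) := by
      have h := pvSlice_snoc in_list prev a hpa halt
      rw [hcast] at h
      rw [hx]; exact h
    rw [PySem.List.enumerate_cons]
    simp only [pvLoopA]
    rw [hcast]
    by_cases hcond : ((a : Int) ∈ idx ∧ (a : Int) ≠ 0) ∨ (a : Int) = (in_list.length : Int) - 1
    · rw [if_pos hcond]
      have hmem : (a : Int) ∈ cuts := (hcuts _).mpr ⟨hcond, by omega, by omega⟩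
      have hfil := pvFilter_ge_mem cuts hsort (a : Int) hmem
      rw [hcast] at hfil
      have hsingle : [x] = PySem.List.slice in_list (some ((a : Nat) : Int)) (some ((a + 1 : Nat) : Int)) := by
        have h := (pvSlice_single in_list a halt).symm
        rw [hcast] at h
        rw [hx]; exact h
      rw [hcur, hsingle,
        ih (a + 1) a (S ++ [PySem.List.slice in_list (some (prev : Int)) (some ((a + 1 : Nat) : Int))])
          hl' (by omega) (by omega),
        hfil]
      simp only [pvSegsFrom, hcast, List.append_assoc, List.singleton_append]
    · rw [if_neg hcond]
      have hnmem : (a : Int) ∉ cuts := fun h => hcond ((hcuts _).mp h).1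
      have hfil := pvFilter_ge_not_mem cuts (a : Int) hnmem
      rw [hcast] at hfil
      rw [hcur, ih (a + 1) prev S hl' (by omega) (by omega), hfil]

-- B's zip-of-consecutive-cuts comprehension produces the same segment list
lemma pvZip_slices (in_list : List Int) :
    ∀ (cuts : List Int) (p : Int),
      ((p :: cuts.dropLast).zip cuts).map
          (fun q => PySem.List.slice in_list (some q.1) (some (q.2 + 1)))
        = pvSegsFrom in_list p cuts := by
  intro cuts
  induction cuts with
  | nil => intro p; rfl
  | cons c cs ih =>
    intro p
    cases cs with
    | nil => simp [pvSegsFrom]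
    | cons c' cs' =>
      rw [List.dropLast_cons₂]
      simp only [List.zip_cons_cons, List.map_cons, pvSegsFrom]
      have h := ih c
      simp only [List.zip_cons_cons, List.map_cons, pvSegsFrom, List.cons.injEq, true_and] at h
      rw [h]

-- a list with two distinct members has length at least 2
lemma pvTwo_le_length (l : List Int) (a b : Int) (ha : a ∈ l) (hb : b ∈ l) (hab : a ≠ b) :
    2 ≤ l.length := by
  match l with
  | [] => simp at ha
  | [c] =>
    rw [List.mem_singleton] at ha hb
    exact absurd (ha.trans hb.symm) hab
  | _ :: _ :: _ => simp

-- ===== VERDICT (by name: the statement is the Claim_ definition above) =====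
theorem list_split_spec : Claim_equal_list_split := by
  intro in_list indices _ hpre
  obtain ⟨hne, hwrap⟩ := hpre
  unfold Spec_list_split list_split list_split_alt
  match hmatch : in_list with
  | [] => exact absurd rfl hne
  | x :: xs =>
  rw [if_neg (by simp : ¬ ((x :: xs : List Int) = []))]
  have hpygd : PySem.List.pyGetD (x :: xs) (-1) 0 = (x :: xs).getLast (by simp) := by
    simp [PySem.List.pyGetD_neg_one]
  simp only [PySem.List.pyGet?_zero_cons, PySem.List.pyGet?_neg_one,
    List.getLast?_eq_some_getLast (show (x :: xs : List Int) ≠ [] by simp),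
    PySem.List.pyGetD_zero_cons]
  rw [hpygd]
  simp only [pvMutIndicesB_eq]
  set n : Int := ((x :: xs).length : Int) with hn
  set closed : Bool := (x == (x :: xs).getLast (List.cons_ne_nil _ _)) with hclosed
  set indices1 : List Int := pvMutIndices indices n closed with hind1
  set indices2 : List Int := PySem.List.sorted (PySem.Set.ofList indices1) (fun x => x) with hind2
  set cuts : List Int := PySem.List.sorted
      (PySem.Set.add (PySem.Set.ofList (indices1.filter (fun i => decide (0 < i ∧ i < n - 1)))) (n - 1))
      (fun x => x) with hcutsdef
  -- membership and order facts about cuts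
  have hmemcuts : ∀ c : Int, c ∈ cuts ↔ ((c ∈ indices1 ∧ 0 < c ∧ c < n - 1) ∨ c = n - 1) := by
    intro c
    rw [hcutsdef, PySem.List.mem_sorted, PySem.Set.mem_add, PySem.Set.mem_ofList, List.mem_filter]
    simp [decide_eq_true_eq]
  have hmem2 : ∀ c : Int, c ∈ indices2 ↔ c ∈ indices1 := by
    intro c
    rw [hind2, PySem.List.mem_sorted, PySem.Set.mem_ofList]
  have hn1 : (1 : Int) ≤ n := by
    rw [hn]; simp only [List.length_cons]; push_cast; omega
  have hcuts : ∀ c : Int, c ∈ cuts ↔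
      (((c ∈ indices2 ∧ c ≠ 0) ∨ c = n - 1) ∧ 0 ≤ c ∧ c < n) := by
    intro c
    rw [hmemcuts]
    constructor
    · rintro (⟨hc, h1, h2⟩ | rfl)
      · exact ⟨Or.inl ⟨(hmem2 c).mpr hc, by omega⟩, by omega, by omega⟩
      · exact ⟨Or.inr rfl, by omega, by omega⟩
    · rintro ⟨(⟨hc, h1⟩ | rfl), h2, h3⟩
      · by_cases hedge : c = n - 1
        · exact Or.inr hedge
        · exact Or.inl ⟨(hmem2 c).mp hc, by omega, by omega⟩
      · exact Or.inr rfl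
  have hnodup : cuts.Nodup := by
    rw [hcutsdef]
    exact ((PySem.List.sorted_perm _ _ _).symm).nodup
      (PySem.Set.nodup_add _ _ (PySem.Set.nodup_ofList _))
  have hle : cuts.Pairwise (fun a b => a ≤ b) := by
    rw [hcutsdef]
    exact PySem.List.sorted_pairwise _ _
  have hsort : cuts.Pairwise (· < ·) := by
    have hand := List.Pairwise.and hle hnodup
    exact hand.imp (fun h => lt_of_le_of_ne h.1 h.2)
  -- A's loop = the slice segments
  have hloop : (pvLoopA indices2 n (PySem.List.enumerate (x :: xs) 0) ([], [])).1
      = pvSegsFrom (x :: xs) 0 cuts := by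
    have h := pvLoopA_eq (x :: xs) indices2 cuts (by rw [← hn]; exact hcuts) hsort
      (x :: xs) 0 0 [] (by simp) (le_refl 0) (by simp)
    have hs00 : PySem.List.slice (x :: xs) (some ((0 : Nat) : Int)) (some ((0 : Nat) : Int)) = [] := by
      rw [PySem.List.slice_natCast]; simp
    rw [hs00] at h
    have hall : cuts.filter (fun c => decide (((0 : Nat) : Int) ≤ c)) = cuts := by
      apply List.filter_eq_self.mpr
      intro c hc
      have := (hcuts c).mp hc
      simp only [decide_eq_true_eq]
      omega
    rw [hall] at h
    rw [← hn] at h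
    simpa using h
  -- B's zip comprehension = the slice segments
  have hsegs : (((0 : Int) :: PySem.List.slice cuts none (some (-1))).zip cuts).map
      (fun p => PySem.List.slice (x :: xs) (some p.1) (some (p.2 + 1)))
      = pvSegsFrom (x :: xs) 0 cuts := by
    rw [PySem.List.slice_to_neg_one]
    exact pvZip_slices (x :: xs) cuts 0
  -- the two branch conditions agree
  have hzero : ((0 : Int) ∉ indices2) ↔ (decide ((0 : Int) ∈ indices1) = false) := by
    rw [hmem2 0]
    simp
  rw [hloop, hsegs]
  by_cases hbr : closed = true ∧ (0 : Int) ∉ indices2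
  · rw [if_pos hbr, if_pos ⟨hbr.1, hzero.mp hbr.2⟩]
    -- in the wrap branch, Pre_ guarantees at least two cuts
    have hclosedeq : x = (x :: xs).getLast (List.cons_ne_nil _ _) := by
      have hb := hbr.1
      rw [hclosed] at hb
      exact eq_of_beq hb
    have hwit : ∃ i ∈ indices, 0 ≤ i ∧ i ≤ n - 1 := by
      apply hwrap
      rw [List.head?_cons, List.getLast?_eq_some_getLast (show (x :: xs : List Int) ≠ [] by simp)]
      exact congrArg some hclosedeq
    obtain ⟨i, hi, hi0, hi1⟩ := hwit
    have h0notin1 : (0 : Int) ∉ indices1 := fun h => hbr.2 ((hmem2 0).mpr h)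
    -- the preamble cannot have fired (it would put 0 into indices1)
    have hnm : ¬ (closed = true ∧ (n - 1) ∈ indices) := by
      rintro ⟨hc, hmem⟩
      apply h0notin1
      rw [hind1, hc]
      exact pvMutIndices_zero_mem indices n hmem
    have hind1eq : indices1 = indices := by
      rw [hind1]
      exact pvMutIndices_eq_self indices n closed hnm
    have hinot : i ≠ n - 1 := fun h => hnm ⟨hbr.1, h ▸ hi⟩
    have hi' : i ∈ indices1 ∧ 0 < i ∧ i < n - 1 := by
      refine ⟨hind1eq ▸ hi, ?_, by omega⟩
      rcases lt_or_eq_of_le hi0 with h | h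
      · exact h
      · exact absurd (hind1eq ▸ hi) (h ▸ h0notin1)
    have hicut : i ∈ cuts := (hmemcuts i).mpr (Or.inl hi')
    have hlast : (n - 1) ∈ cuts := (hmemcuts _).mpr (Or.inr rfl)
    have hlen2 : 2 ≤ cuts.length := pvTwo_le_length cuts i (n - 1) hicut hlast hinot
    have hslen : 2 ≤ (pvSegsFrom (x :: xs) 0 cuts).length := by
      rw [length_pvSegsFrom]; exact hlen2
    obtain ⟨s0, r, rs, hseg⟩ : ∃ s0 r rs, pvSegsFrom (x :: xs) 0 cuts = s0 :: r :: rs := by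
      rcases h : pvSegsFrom (x :: xs) 0 cuts with _ | ⟨s0, _ | ⟨r, rs⟩⟩
      · rw [h] at hslen; simp at hslen
      · rw [h] at hslen; simp at hslen
      · exact ⟨s0, r, rs, rfl⟩
    rw [hseg]
    simp only [PySem.List.slice_from_one, List.dropLast_cons₂, List.tail_cons, List.cons_append,
      List.getLastD_eq_getLast?, List.getLast?_cons_cons]
  · rw [if_neg hbr]
    rw [if_neg (by
      rintro ⟨h1, h2⟩
      exact hbr ⟨h1, hzero.mpr h2⟩)]
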